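-- pv_equiv track=rewrite | github.com/gholibqasobov/CodeWars | CodeWars/Character with longest consecutive repetition.py | longest_repetition
-- ===== SOURCE A (Python) =====
-- def longest_repetition(chars):
--     count = 0
--     ch = chars[0]
--
--     for i in range(len(chars)):
--         currnt_count = 1
--         for j in range(i + 1, len(chars)):
--             if chars[i] != chars[j]:
--                 break
--             currnt_count += 1
--
--         if currnt_count > count:
--             count = currnt_count
--             ch = chars[i]
--
--     return ch, count
-- ===== SOURCE B (Python) =====
-- def longest_repetition(chars):
--     best_ch, best = "", 0
--     run_ch, run = "", 0
--     for c in chars: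
--         if c == run_ch:
--             run += 1
--         else:
--             run_ch, run = c, 1
--         if run > best:
--             best_ch, best = run_ch, run
--     return best_ch, best
-- ===== Notes on version B (the rewrite author's own statement) =====
-- stated objective: faster
-- what changed: Replaced the nested rescan (for each index, re-count the run starting there) by a single linear pass that maintains the current run length and updates the best on strict improvement.
-- outside the precondition, e.g. on longest_repetition(''): A raises IndexError, B returns ('', 0)
-- crash fix: On the empty string A raises IndexError at chars[0]; B returns ('', 0). — e.g. on longest_repetition(""): A raises IndexError, B returns ("", 0)
import Mathlib
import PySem

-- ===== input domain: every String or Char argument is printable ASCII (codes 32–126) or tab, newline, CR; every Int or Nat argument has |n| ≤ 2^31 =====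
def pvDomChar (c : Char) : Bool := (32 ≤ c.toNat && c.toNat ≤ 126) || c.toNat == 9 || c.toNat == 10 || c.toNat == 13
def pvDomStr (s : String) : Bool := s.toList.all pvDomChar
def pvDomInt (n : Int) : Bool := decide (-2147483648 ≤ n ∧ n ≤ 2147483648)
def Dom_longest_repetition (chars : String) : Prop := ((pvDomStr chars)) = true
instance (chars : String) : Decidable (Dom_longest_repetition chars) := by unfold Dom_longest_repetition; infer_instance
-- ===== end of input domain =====

-- B replaces A's per-index rescan of the following run by one linear pass; the proof relates both to the run decomposition of the string.

-- ===== PORT A =====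
-- inner loop: 'for j in range(i+1, len): if chars[i] != chars[j]: break; currnt_count += 1'
-- counted over the list after position i
def aCount (c : Char) : List Char → Int
  | [] => 0
  | x :: xs => if c ≠ x then 0 else 1 + aCount c xs

-- outer loop over i = 0 .. len-1; the suffix at index i is the recursion argument,
-- state (count, ch) as in A
def aOuter : List Char → Int → String → Int × String
  | [], count, ch => (count, ch)
  | x :: xs, count, ch =>
      let cc : Int := 1 + aCount x xs
      if cc > count then aOuter xs cc (String.ofList [x]) else aOuter xs count ch

def longest_repetition (chars : String) : String × Int :=
  let l := chars.toList
  -- 'ch = chars[0]': raises IndexError on the empty string (excluded by Pre_)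
  let ch0 : String := match l with | [] => "" | x :: _ => String.ofList [x]
  let r := aOuter l 0 ch0
  (r.2, r.1)

-- ===== PORT B =====
-- single pass, state (best_ch, best, run_ch, run)
def bLoop : List Char → String → Int → String → Int → String × Int
  | [], bestCh, best, _, _ => (bestCh, best)
  | c :: rest, bestCh, best, runCh, run =>
      let s := String.ofList [c]
      let runCh' := if s = runCh then runCh else s
      let run' : Int := if s = runCh then run + 1 else 1
      let bestCh' := if run' > best then runCh' else bestCh
      let best' := if run' > best then run' else best
      bLoop rest bestCh' best' runCh' run'

def longest_repetition_alt (chars : String) : String × Int :=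
  bLoop chars.toList "" 0 "" 0

-- ===== PRECONDITION & SPEC =====
-- Pre_ excludes only the empty string, on which A raises IndexError at chars[0].
def Pre_longest_repetition (chars : String) : Prop := chars ≠ ""
instance (chars : String) : Decidable (Pre_longest_repetition chars) := by unfold Pre_longest_repetition; infer_instance
def pvWitness_longest_repetition : String := "aab"

-- On the empty string A raises IndexError (chars[0]); B returns ("", 0).
def Raises_longest_repetition (chars : String) : Prop := chars = ""
instance (chars : String) : Decidable (Raises_longest_repetition chars) := by unfold Raises_longest_repetition; infer_instance
def pvRaiseWitness_longest_repetition : String := ""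
def pvRaiseWitnessOut_longest_repetition : String × Int := ("", 0)

def Spec_longest_repetition (chars : String) (out : String × Int) : Prop := out = longest_repetition_alt chars
instance (chars : String) (out : String × Int) : Decidable (Spec_longest_repetition chars out) := by unfold Spec_longest_repetition; infer_instance

-- ===== CLAIM (what is proved, stated in full; the proofs are below) =====
def Claim_equal_longest_repetition : Prop := ∀ (chars : String), Dom_longest_repetition chars → Pre_longest_repetition chars → Spec_longest_repetition chars (longest_repetition chars)
def Claim_raises_longest_repetition : Prop := (∀ (chars : String), Dom_longest_repetition chars → Raises_longest_repetition chars → ¬ Pre_longest_repetition chars) ∧ (Dom_longest_repetition (pvRaiseWitness_longest_repetition) ∧ Raises_longest_repetition (pvRaiseWitness_longest_repetition) ∧ longest_repetition_alt (pvRaiseWitness_longest_repetition) = pvRaiseWitnessOut_longest_repetition)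

-- ===== LEMMAS AND PROOFS =====

lemma aCount_nohead (c : Char) (rest : List Char) (h : ∀ x, rest.head? = some x → x ≠ c) :
    aCount c rest = 0 := by
  cases rest with
  | nil => rfl
  | cons x xs =>
      have := h x rfl
      simp [aCount, Ne.symm this]

lemma aCount_replicate (c : Char) (m : Nat) (rest : List Char)
    (h : ∀ x, rest.head? = some x → x ≠ c) :
    aCount c (List.replicate m c ++ rest) = m := by
  induction m with
  | zero => simpa using aCount_nohead c rest h
  | succ k ih =>
      simp [List.replicate_succ, aCount, ih]
      omega

lemma A_step (m : Nat) (c : Char) (rest : List Char)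
    (h : ∀ x, rest.head? = some x → x ≠ c) (count : Int) (ch : String) :
    aOuter (List.replicate (m + 1) c ++ rest) count ch =
      aOuter rest (if ((m : Int) + 1) > count then (m : Int) + 1 else count)
        (if ((m : Int) + 1) > count then String.ofList [c] else ch) := by
  induction m generalizing count ch with
  | zero =>
      simp [List.replicate_succ, aOuter, aCount_nohead c rest h]
      split_ifs <;> rfl
  | succ k ih =>
      have hc : aCount c (List.replicate (k + 1) c ++ rest) = (k + 1 : Nat) :=
        aCount_replicate c (k + 1) rest h
      rw [List.replicate_succ, List.cons_append]
      simp only [aOuter, hc]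
      push_cast
      by_cases hgt : (1 : Int) + ((k : Int) + 1) > count
      · rw [if_pos hgt, show (1 : Int) + ((k : Int) + 1) = ((k : Int) + 1) + 1 by ring, ih,
          if_neg (by omega), if_neg (by omega), if_pos (by omega), if_pos (by omega)]
      · rw [if_neg hgt, ih,
          if_neg (by omega), if_neg (by omega), if_neg (by omega), if_neg (by omega)]

lemma B_run (c : Char) (m : Nat) (rest : List Char) :
    ∀ (bestCh : String) (best run : Int), run ≤ best →
    bLoop (List.replicate m c ++ rest) bestCh best (String.ofList [c]) run =
      bLoop rest (if run + (m : Int) > best then String.ofList [c] else bestCh)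
        (if run + (m : Int) > best then run + (m : Int) else best) (String.ofList [c]) (run + (m : Int)) := by
  induction m with
  | zero =>
      intro bestCh best run hle
      rw [if_neg (by omega), if_neg (by omega)]
      simp
  | succ k ih =>
      intro bestCh best run hle
      rw [List.replicate_succ, List.cons_append]
      simp only [bLoop, if_true]
      push_cast
      by_cases hgt : run + 1 > best
      · rw [if_pos hgt, if_pos hgt, ih _ _ _ (le_refl _), ite_self,
          show run + 1 + (k : Int) = run + ((k : Int) + 1) by ring]
        have h2 : (if run + ((k : Int) + 1) > run + 1 then run + ((k : Int) + 1) else run + 1)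
            = run + ((k : Int) + 1) := by split_ifs <;> omega
        rw [h2, if_pos (by omega), if_pos (by omega)]
      · rw [if_neg hgt, if_neg hgt, ih _ _ _ (by omega),
          show run + 1 + (k : Int) = run + ((k : Int) + 1) by ring]

lemma B_step (m : Nat) (c : Char) (rest : List Char) (bestCh : String) (best run : Int)
    (runCh : String) (hne : String.ofList [c] ≠ runCh) (hb : 0 ≤ best) :
    bLoop (List.replicate (m + 1) c ++ rest) bestCh best runCh run =
      bLoop rest (if ((m : Int) + 1) > best then String.ofList [c] else bestCh)
        (if ((m : Int) + 1) > best then (m : Int) + 1 else best) (String.ofList [c]) ((m : Int) + 1) := by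
  rw [List.replicate_succ, List.cons_append]
  simp only [bLoop, if_neg hne]
  by_cases h1 : (1 : Int) > best
  · rw [if_pos h1, if_pos h1, B_run c m rest _ _ _ (le_refl 1), ite_self,
      show (1 : Int) + (m : Int) = (m : Int) + 1 by ring]
    have h2 : (if (m : Int) + 1 > 1 then (m : Int) + 1 else 1) = (m : Int) + 1 := by
      split_ifs <;> omega
    rw [h2, if_pos (by omega), if_pos (by omega)]
  · rw [if_neg h1, if_neg h1, B_run c m rest _ _ _ (by omega),
      show (1 : Int) + (m : Int) = (m : Int) + 1 by ring]

lemma mk_single_ne (a b : Char) (h : a ≠ b) : String.ofList [a] ≠ String.ofList [b] := by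
  intro hs
  apply h
  have := congrArg String.toList hs
  simpa using this

lemma main_lemma (n : Nat) : ∀ (l : List Char), l.length ≤ n →
    ∀ (count run : Int) (ch runCh : String), 0 ≤ count →
    (∀ c, l.head? = some c → runCh ≠ String.ofList [c]) →
    aOuter l count ch = Prod.swap (bLoop l ch count runCh run) := by
  induction n with
  | zero =>
      intro l hl
      have : l = [] := List.length_eq_zero_iff.mp (Nat.le_zero.mp hl)
      subst this
      intro count run ch runCh _ _
      rfl
  | succ n ih =>
      intro l hl count run ch runCh hc hhead
      cases l with
      | nil => rfl
      | cons c xs =>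
          set t := xs.takeWhile (· = c) with ht
          set d := xs.dropWhile (· = c) with hd
          have hxs : t ++ d = xs := List.takeWhile_append_dropWhile
          have htrep : t = List.replicate t.length c := by
            apply List.eq_replicate_of_mem
            intro x hx
            have := List.mem_takeWhile_imp hx
            simpa using this
          have hdhead : ∀ x, d.head? = some x → x ≠ c := by
            intro x hx
            have := List.head?_dropWhile_not (· = c) xs
            rw [← hd] at this
            rw [hx] at this
            simpa using this
          have hdecomp : c :: xs = List.replicate (t.length + 1) c ++ d := by
            rw [List.replicate_succ, List.cons_append, ← htrep, hxs]
          have hdlen : d.length ≤ n := by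
            have h1 : d.length ≤ xs.length := by
              rw [← hxs]; simp
            have h2 : xs.length + 1 ≤ n + 1 := by simpa using hl
            omega
          rw [hdecomp]
          rw [A_step t.length c d hdhead count ch]
          rw [B_step t.length c d ch count run runCh
            (by
              have := hhead c rfl
              exact fun h => this h.symm)
            hc]
          rw [ih d hdlen _ ((t.length : Int) + 1) _ (String.ofList [c])
            (by split_ifs <;> omega)
            (by
              intro x hx
              exact Ne.symm (mk_single_ne x c (hdhead x hx)))]

-- ===== VERDICT (by name: the statement is the Claim_ definition above) =====

theorem longest_repetition_raises : Claim_raises_longest_repetition := by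
  unfold Claim_raises_longest_repetition
  exact ⟨fun chars _ hr hp => hp hr, by decide⟩

-- the main equivalence; on the inputs longest_repetition_raises is about, Pre_ excludes the claim
theorem longest_repetition_spec : Claim_equal_longest_repetition := by
  have _ := longest_repetition_raises
  intro chars _ hpre
  unfold Spec_longest_repetition longest_repetition longest_repetition_alt
  cases hl : chars.toList with
  | nil =>
      exact absurd (by ext1; simp [hl]) hpre
  | cons c xs =>
      show ((aOuter (c :: xs) 0 (String.ofList [c])).2, (aOuter (c :: xs) 0 (String.ofList [c])).1)
        = bLoop (c :: xs) "" 0 "" 0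
      -- initial ch differs ("" vs chars[0]); both are overwritten by the first run:
      -- unfold one run step on each side and compare
      set t := xs.takeWhile (· = c) with ht
      set d := xs.dropWhile (· = c) with hd
      have hxs : t ++ d = xs := List.takeWhile_append_dropWhile
      have htrep : t = List.replicate t.length c := by
        apply List.eq_replicate_of_mem
        intro x hx
        have := List.mem_takeWhile_imp hx
        simpa using this
      have hdhead : ∀ x, d.head? = some x → x ≠ c := by
        intro x hx
        have := List.head?_dropWhile_not (· = c) xs
        rw [← hd] at this
        rw [hx] at this
        simpa using this
      have hdecomp : c :: xs = List.replicate (t.length + 1) c ++ d := by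
        rw [List.replicate_succ, List.cons_append, ← htrep, hxs]
      rw [hdecomp]
      rw [A_step t.length c d hdhead 0 (String.ofList [c])]
      rw [B_step t.length c d "" 0 0 ""
        (by
          intro h
          have := congrArg String.toList h
          simp at this)
        (le_refl _)]
      have h5 : ((t.length : Int) + 1 > 0) := by omega
      simp only [if_pos h5]
      rw [main_lemma d.length d (le_refl _) ((t.length : Int) + 1) ((t.length : Int) + 1)
        (String.ofList [c]) (String.ofList [c]) (by omega)
        (fun x hx => Ne.symm (mk_single_ne x c (hdhead x hx)))]
      rfl
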